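-- pv_equiv track=rewrite | github.com/RitaLB/INE5421_Formais | lexico/parser.py | expand_group
-- ===== SOURCE A (Python) =====
-- def expand_group(group_str):
--     """
--     Expande uma string de grupo como [a-zA-Z0-9] para (a|b|...|z|A|...|Z|0|...|9)
--     """
--     chars = []
--     i = 1  # começa após o [
--     while i < len(group_str) - 1:
--         if i+2 < len(group_str) - 1 and group_str[i+1] == '-':
--             start = group_str[i]
--             end = group_str[i+2]
--             for c in range(ord(start), ord(end) + 1):
--                 chars.append(chr(c))
--             i += 3  # pula o intervalo
--         else:
--             chars.append(group_str[i])
--             i += 1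
--     return '(' + '|'.join(chars) + ')'
-- ===== SOURCE B (Python) =====
-- def expand_group(group_str):
--     """
--     Expande uma string de grupo como [a-zA-Z0-9] para (a|b|...|z|A|...|Z|0|...|9)
--     """
--     out = []
--     buf = []
--     for ch in group_str[1:-1]:
--         buf.append(ch)
--         if len(buf) == 3:
--             if buf[1] == '-':
--                 out.extend(chr(c) for c in range(ord(buf[0]), ord(buf[2]) + 1))
--                 buf = []
--             else:
--                 out.append(buf.pop(0))
--     out.extend(buf)
--     return '(' + '|'.join(out) + ')'
-- ===== Notes on version B (the rewrite author's own statement) =====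
-- stated objective: alternative
-- what changed: Replaced the index-arithmetic while loop with lookahead tests against len(group_str)-1 by a single forward pass over the sliced inner string that maintains a 3-slot pending buffer (emit a range when the buffer fills with '-' in the middle, otherwise shift one char; flush at the end).
import Mathlib
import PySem

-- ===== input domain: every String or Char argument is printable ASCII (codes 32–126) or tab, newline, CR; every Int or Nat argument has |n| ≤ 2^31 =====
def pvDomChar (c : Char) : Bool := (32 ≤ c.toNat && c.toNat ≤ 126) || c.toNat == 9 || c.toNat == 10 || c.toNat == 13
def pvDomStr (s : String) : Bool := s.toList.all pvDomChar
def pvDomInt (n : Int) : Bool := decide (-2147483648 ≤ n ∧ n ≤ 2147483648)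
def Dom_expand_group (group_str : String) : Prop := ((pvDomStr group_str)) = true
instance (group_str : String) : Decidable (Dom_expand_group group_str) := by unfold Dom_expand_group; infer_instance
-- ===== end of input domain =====

-- B replaces A's index-arithmetic while loop (lookahead tests against len-1) by a single
-- forward pass over the sliced inner string with a 3-slot pending buffer (alternative strategy).

-- shared helper: [chr(c) for c in range(ord(a), ord(b)+1)]
def rangeChars (a b : Char) : List Char :=
  (List.range' a.toNat (b.toNat + 1 - a.toNat)).map Char.ofNat

-- ===== PORT A =====
-- the while loop: i runs over indices 1 .. len-2, consuming 3 (range) or 1 chars;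
-- fuel = s.length bounds the iteration count (i strictly increases each pass)
def expandALoop (s : List Char) (i fuel : Nat) : List Char :=
  match fuel with
  | 0 => []
  | fuel + 1 =>
    if i < s.length - 1 then
      if i + 2 < s.length - 1 ∧ s.getD (i + 1) ' ' = '-' then
        rangeChars (s.getD i ' ') (s.getD (i + 2) ' ') ++ expandALoop s (i + 3) fuel
      else
        s.getD i ' ' :: expandALoop s (i + 1) fuel
    else []

def expand_group (group_str : String) : String :=
  String.ofList ('(' :: List.intersperse '|' (expandALoop group_str.toList 1 group_str.toList.length) ++ [')'])

-- ===== PORT B =====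
-- loop body: append ch to buf; on a full 3-slot buffer emit a range ('-' in the middle)
-- or shift out one char; state = (buf, out)
def stepB (st : List Char × List Char) (ch : Char) : List Char × List Char :=
  let buf := st.1 ++ [ch]
  if buf.length = 3 then
    if buf.getD 1 ' ' = '-' then
      ([], st.2 ++ rangeChars (buf.getD 0 ' ') (buf.getD 2 ' '))
    else
      (buf.drop 1, st.2 ++ [buf.getD 0 ' '])
  else (buf, st.2)

def expand_group_alt (group_str : String) : String :=
  let st := (PySem.List.slice group_str.toList (some 1) (some (-1))).foldl stepB ([], [])
  String.ofList ('(' :: List.intersperse '|' (st.2 ++ st.1) ++ [')'])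

-- ===== PRECONDITION & SPEC =====
def Spec_expand_group (group_str : String) (out : String) : Prop := out = expand_group_alt group_str
instance (group_str : String) (out : String) : Decidable (Spec_expand_group group_str out) := by unfold Spec_expand_group; infer_instance

-- ===== CLAIM (what is proved, stated in full; the proofs are below) =====
def Claim_equal_expand_group : Prop := ∀ (group_str : String), Dom_expand_group group_str → Spec_expand_group group_str (expand_group group_str)

-- ===== LEMMAS AND PROOFS =====

-- reference recursion both ports are bridged to (proof-side only)
def goB (cs : List Char) : List Char :=
  match cs with
  | a :: b :: c :: rest =>
      if b = '-' then rangeChars a c ++ goB rest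
      else a :: goB (b :: c :: rest)
  | a :: rest => a :: goB rest
  | [] => []

-- group_str[1:-1] = (drop 1).take (len - 2)
lemma slice_one_neg_one (s : List Char) :
    PySem.List.slice s (some 1) (some (-1)) = (s.drop 1).take (s.length - 2) := by
  cases s with
  | nil => simp [PySem.List.slice]
  | cons a t =>
    simp [PySem.List.slice, PySem.List.clampIdx]
    split_ifs <;> omega

-- peeling one element off a take-of-drop window
lemma take_drop_cons (s : List Char) (i k : Nat) (hi : i < s.length) :
    (s.drop i).take (k + 1) = s[i] :: (s.drop (i + 1)).take k := by
  rw [List.drop_eq_getElem_cons hi, List.take_succ_cons]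

-- goB steps over a single char whenever the 3-char range pattern cannot fire
lemma goB_cons (a : Char) (t : List Char) (h : ∀ b c r, t = b :: c :: r → b ≠ '-') :
    goB (a :: t) = a :: goB t := by
  match t with
  | [] => simp [goB]
  | [b] => simp [goB]
  | b :: c :: r => have hb := h b c r rfl; simp [goB, hb]

-- A's loop from index i computes goB of the window s[i : len-1]
lemma loop_eq_goB (s : List Char) (fuel : Nat) : ∀ i, s.length - 1 - i ≤ fuel →
    expandALoop s i fuel = goB ((s.drop i).take (s.length - 1 - i)) := by
  induction fuel with
  | zero =>
    intro i hf
    have h0 : s.length - 1 - i = 0 := by omega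
    simp [expandALoop, h0, goB]
  | succ fuel ih => ?_
  intro i hf
  rw [expandALoop]
  split_ifs with h1 h2
  · obtain ⟨h2a, h2b⟩ := h2
    have hi : i < s.length := by omega
    have hi1 : i + 1 < s.length := by omega
    have hi2 : i + 2 < s.length := by omega
    have e : (s.drop i).take (s.length - 1 - i)
        = s[i] :: s[i+1] :: s[i+2] :: (s.drop (i + 3)).take (s.length - 1 - (i + 3)) := by
      rw [show s.length - 1 - i = ((s.length - 1 - (i + 3)) + 1 + 1) + 1 from by omega,
        take_drop_cons s i _ hi, take_drop_cons s (i + 1) _ hi1,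
        take_drop_cons s (i + 1 + 1) _ (by omega)]
    have hdash : s[i+1] = '-' := by rwa [List.getD_eq_getElem s ' ' hi1] at h2b
    rw [e, hdash, ih (i + 3) (by omega)]
    simp [goB, List.getElem?_eq_getElem hi, List.getElem?_eq_getElem hi2]
  · have hi : i < s.length := by omega
    rw [ih (i + 1) (by omega)]
    have e : (s.drop i).take (s.length - 1 - i)
        = s[i] :: (s.drop (i + 1)).take (s.length - 1 - (i + 1)) := by
      rw [show s.length - 1 - i = (s.length - 1 - (i + 1)) + 1 from by omega,
        take_drop_cons s i _ hi]
    rw [e, goB_cons, List.getD_eq_getElem s ' ' hi]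
    intro b c r ht hb
    by_cases hc : i + 2 < s.length - 1
    · have hi1 : i + 1 < s.length := by omega
      have e2 : (s.drop (i + 1)).take (s.length - 1 - (i + 1))
          = s[i+1] :: (s.drop (i + 2)).take (s.length - 1 - (i + 2)) := by
        rw [show s.length - 1 - (i + 1) = (s.length - 1 - (i + 2)) + 1 from by omega,
          take_drop_cons s (i + 1) _ hi1]
      rw [e2] at ht
      have hb' : s[i+1] = '-' := by
        injection ht with h1' _
        rw [h1', hb]
      exact h2 ⟨hc, by rw [List.getD_eq_getElem s ' ' hi1, hb']⟩
    · have hle : ((s.drop (i + 1)).take (s.length - 1 - (i + 1))).length ≤ 1 := by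
        simp [List.length_take, List.length_drop]
        omega
      rw [ht] at hle
      simp at hle
  · have h0 : s.length - 1 - i = 0 := by omega
    simp [h0, goB]

-- B's buffer machine computes goB of (buffer contents ++ remaining input)
lemma fold_eq_goB (cs : List Char) : ∀ buf out, buf.length ≤ 2 →
    (cs.foldl stepB (buf, out)).2 ++ (cs.foldl stepB (buf, out)).1 = out ++ goB (buf ++ cs) := by
  induction cs with
  | nil =>
    intro buf out hb
    match buf with
    | [] => simp [goB]
    | [a] => simp [goB]
    | [a, b] => simp [goB]
  | cons ch cs ih =>
    intro buf out hb
    match buf with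
    | [] =>
      rw [List.foldl_cons, show stepB ([], out) ch = ([ch], out) from rfl]
      rw [ih [ch] out (by simp)]
      simp
    | [x] =>
      rw [List.foldl_cons, show stepB ([x], out) ch = ([x, ch], out) from rfl]
      rw [ih [x, ch] out (by simp)]
      simp
    | [x, y] =>
      rw [List.foldl_cons]
      by_cases hy : y = '-'
      · rw [show stepB ([x, y], out) ch = ([], out ++ rangeChars x ch) from by
          simp [stepB, hy]]
        rw [ih [] (out ++ rangeChars x ch) (by simp)]
        subst hy
        simp [goB]
      · rw [show stepB ([x, y], out) ch = ([y, ch], out ++ [x]) from by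
          simp [stepB, hy]]
        rw [ih [y, ch] (out ++ [x]) (by simp)]
        simp [goB, hy]

-- ===== VERDICT (by name: the statement is the Claim_ definition above) =====
theorem expand_group_spec : Claim_equal_expand_group := by
  intro g _
  unfold Spec_expand_group expand_group expand_group_alt
  dsimp only
  rw [slice_one_neg_one, loop_eq_goB g.toList g.toList.length 1 (by omega),
    fold_eq_goB _ [] [] (by simp),
    show g.toList.length - 1 - 1 = g.toList.length - 2 from by omega]
  simp
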